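-- pv_equiv track=rewrite | github.com/adamchainz/advent-of-code-dot-com-answers | 2015/11b.py | contains_straight
-- ===== SOURCE A (Python) =====
-- def contains_straight(string):
--     straight = 1
--     ord_last = ord(string[0])
--     for char in string[1:]:
--         if ord(char) == ord_last + 1:
--             straight += 1
--             if straight == 3:
--                 return True
--         else:
--             straight = 1
--         ord_last = ord(char)
--     return False
-- ===== SOURCE B (Python) =====
-- def contains_straight(string):
--     return any(
--         ord(b) == ord(a) + 1 and ord(c) == ord(b) + 1
--         for a, b, c in zip(string, string[1:], string[2:])
--     )
-- ===== Notes on version B (the rewrite author's own statement) =====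
-- stated objective: simpler
-- what changed: Replaced the reset-on-break streak counter with a one-liner scanning overlapping character triples via zip and any.
import Mathlib
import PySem

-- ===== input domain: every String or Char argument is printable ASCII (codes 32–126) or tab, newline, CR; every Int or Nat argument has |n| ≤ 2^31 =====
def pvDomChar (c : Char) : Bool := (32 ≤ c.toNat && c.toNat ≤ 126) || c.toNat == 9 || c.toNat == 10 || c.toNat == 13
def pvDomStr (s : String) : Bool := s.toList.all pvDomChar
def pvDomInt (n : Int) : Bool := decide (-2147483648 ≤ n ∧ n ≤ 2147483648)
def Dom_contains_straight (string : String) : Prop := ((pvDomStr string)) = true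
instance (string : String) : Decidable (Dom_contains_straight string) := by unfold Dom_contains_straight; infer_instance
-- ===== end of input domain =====

-- B replaces A's reset-on-break streak counter with a scan of overlapping triples (zip/any); simpler, same cost.

-- ===== PORT A =====
-- the for-loop over string[1:] with state (straight, ord_last), with early return on straight == 3
def pvLoopA : List Char → Int → Int → Bool
  | [], _, _ => false
  | ch :: rest, straight, ordLast =>
    if (ch.toNat : Int) = ordLast + 1 then
      if straight + 1 = 3 then true
      else pvLoopA rest (straight + 1) (ch.toNat : Int)
    else pvLoopA rest 1 (ch.toNat : Int)

def contains_straight (string : String) : Bool :=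
  match string.toList with
  | [] => false   -- unreached under Pre_: Python raises IndexError at ord(string[0])
  | c :: rest => pvLoopA rest 1 (c.toNat : Int)

-- ===== PORT B =====
def contains_straight_alt (string : String) : Bool :=
  let l := string.toList
  ((l.zip (l.drop 1)).zip (l.drop 2)).any
    (fun p => decide (p.1.2.toNat = p.1.1.toNat + 1) && decide (p.2.toNat = p.1.2.toNat + 1))

-- ===== PRECONDITION & SPEC =====
-- Pre_ excludes only the empty string, on which A raises IndexError (string[0]).
def Pre_contains_straight (string : String) : Prop := string ≠ ""
instance (string : String) : Decidable (Pre_contains_straight string) := by unfold Pre_contains_straight; infer_instance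
def pvWitness_contains_straight : String := "abc"

def Spec_contains_straight (string : String) (out : Bool) : Prop := out = contains_straight_alt string
instance (string : String) (out : Bool) : Decidable (Spec_contains_straight string out) := by unfold Spec_contains_straight; infer_instance

-- ===== CLAIM (what is proved, stated in full; the proofs are below) =====
def Claim_equal_contains_straight : Prop := ∀ (string : String), Dom_contains_straight string → Pre_contains_straight string → Spec_contains_straight string (contains_straight string)

-- ===== LEMMAS AND PROOFS =====

-- proof-side recursive form of the triple scan
def trip3 : List Char → Bool
  | a :: b :: c :: r =>
      (decide (b.toNat = a.toNat + 1) && decide (c.toNat = b.toNat + 1)) || trip3 (b :: c :: r)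
  | _ => false

theorem alt_eq_trip3 : ∀ l : List Char,
    ((l.zip (l.drop 1)).zip (l.drop 2)).any
      (fun p => decide (p.1.2.toNat = p.1.1.toNat + 1) && decide (p.2.toNat = p.1.2.toNat + 1))
      = trip3 l := by
  intro l
  match l with
  | [] => rfl
  | [a] => rfl
  | [a, b] => rfl
  | a :: b :: c :: r =>
    have ih := alt_eq_trip3 (b :: c :: r)
    simp only [List.drop, List.zip_cons_cons, List.any_cons, trip3] at ih ⊢
    rw [ih]

theorem trip3_tail (b c : Char) (r : List Char) (h : ¬ c.toNat = b.toNat + 1) :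
    trip3 (b :: c :: r) = trip3 (c :: r) := by
  match r with
  | [] => simp [trip3]
  | d :: r' => simp [trip3, h]

theorem key : ∀ l : List Char,
    (∀ a : Char, pvLoopA l 1 (a.toNat : Int) = trip3 (a :: l)) ∧
    (∀ a b : Char, b.toNat = a.toNat + 1 → pvLoopA l 2 (b.toNat : Int) = trip3 (a :: b :: l)) := by
  intro l
  induction l with
  | nil =>
    constructor
    · intro a; simp [pvLoopA, trip3]
    · intro a b h; simp [pvLoopA, trip3]
  | cons x r ih =>
    constructor
    · intro a
      simp only [pvLoopA]
      by_cases h : x.toNat = a.toNat + 1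
      · have hi : ((x.toNat : Int) = (a.toNat : Int) + 1) := by push_cast; omega
        rw [if_pos hi, if_neg (by norm_num : ¬ (1 : Int) + 1 = 3),
            (by norm_num : (1 : Int) + 1 = 2), ih.2 a x h]
      · have hi : ¬ ((x.toNat : Int) = (a.toNat : Int) + 1) := by push_cast; omega
        rw [if_neg hi, ih.1 x, trip3_tail a x r h]
    · intro a b h
      simp only [pvLoopA]
      by_cases h2 : x.toNat = b.toNat + 1
      · have hi : ((x.toNat : Int) = (b.toNat : Int) + 1) := by push_cast; omega
        rw [if_pos hi, if_pos (by norm_num : (2 : Int) + 1 = 3)]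
        simp [trip3, h, h2]
      · have hi : ¬ ((x.toNat : Int) = (b.toNat : Int) + 1) := by push_cast; omega
        rw [if_neg hi, ih.1 x]
        have t1 : trip3 (a :: b :: x :: r) = trip3 (b :: x :: r) := by
          simp [trip3, h2]
        rw [t1, trip3_tail b x r h2]

-- ===== VERDICT (by name: the statement is the Claim_ definition above) =====
theorem contains_straight_spec : Claim_equal_contains_straight := by
  intro s _ hpre
  unfold Spec_contains_straight contains_straight contains_straight_alt
  rw [alt_eq_trip3 s.toList]
  match hl : s.toList with
  | [] =>
    exact absurd (String.toList_inj.mp (by simp [hl])) hpre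
  | c :: rest =>
    exact (key rest).1 c
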